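-- pv_equiv track=rewrite | github.com/safiullah-foragy/Machine-learning | Ai algorithm implementation/Bidirectional_Search.py | dfs_from_target
-- ===== SOURCE A (Python) =====
-- def dfs_from_target(node, src, adj, vis1, vis2):
--     if vis1[node]:
--         return True
--     vis2[node] = True
--
--     for child in adj[node]:
--         if not vis2[child]:
--             if dfs_from_target(child, src, adj, vis1, vis2):
--                 return True
--     return False
-- ===== SOURCE B (Python) =====
-- def dfs_from_target(node, src, adj, vis1, vis2):
--     # Iterative DFS with an explicit stack of child iterators (same pre-order,
--     # same in-place vis2 marking as the recursive version, no Python recursion).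
--     if vis1[node]:
--         return True
--     vis2[node] = True
--     stack = [iter(adj[node])]
--     while stack:
--         for child in stack[-1]:
--             if vis2[child]:
--                 continue
--             if vis1[child]:
--                 return True
--             vis2[child] = True
--             stack.append(iter(adj[child]))
--             break
--         else:
--             stack.pop()
--     return False
-- ===== Notes on version B (the rewrite author's own statement) =====
-- stated objective: alternative
-- what changed: The recursive DFS is replaced by an iterative DFS over an explicit stack of child iterators, replaying the same pre-order traversal (and the same in-place vis2 marking) without Python recursion.
-- outside the precondition, e.g. on dfs_from_target(0, 0, {0: [1]}, [False, True], [False, False]): A returns True, B returns True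
import Mathlib
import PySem

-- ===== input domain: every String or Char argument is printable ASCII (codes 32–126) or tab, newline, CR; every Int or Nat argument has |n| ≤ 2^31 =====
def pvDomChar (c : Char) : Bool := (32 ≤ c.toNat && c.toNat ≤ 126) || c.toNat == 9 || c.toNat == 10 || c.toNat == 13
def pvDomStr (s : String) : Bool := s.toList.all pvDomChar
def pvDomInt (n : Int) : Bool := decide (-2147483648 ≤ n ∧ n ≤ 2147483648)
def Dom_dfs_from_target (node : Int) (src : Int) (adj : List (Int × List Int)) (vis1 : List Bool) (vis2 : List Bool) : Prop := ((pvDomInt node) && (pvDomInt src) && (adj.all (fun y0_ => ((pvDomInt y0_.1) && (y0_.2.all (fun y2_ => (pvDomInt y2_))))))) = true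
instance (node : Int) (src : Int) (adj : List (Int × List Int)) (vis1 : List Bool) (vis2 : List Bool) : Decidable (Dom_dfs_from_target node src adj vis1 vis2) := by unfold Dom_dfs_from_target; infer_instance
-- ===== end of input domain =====

-- B rewrites the recursive DFS as an iterative DFS over an explicit stack of child iterators
-- (same pre-order). Both Pythons mutate vis2 in place identically, but only the RETURN VALUE is
-- claimed and proved equal; where the Python raises (IndexError/KeyError, at the same point in
-- both versions) each port returns false, so the ports are equal on every input.

-- ===== PORT A =====
-- dict lookup on the association list (first match = Python dict lookup, keys unique); none = KeyError
def lookupAdj : List (Int × List Int) → Int → Option (List Int)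
  | [], _ => none
  | (k, l) :: rest, x => if k = x then some l else lookupAdj rest x

-- the `for child in adj[node]` loop of A, parametrised by the recursive call;
-- none = an exception propagating out, some (found, vis2) = normal return value plus mutated vis2
def loopA (recf : Int → List Bool → Option (Bool × List Bool)) : List Int → List Bool → Option (Bool × List Bool)
  | [], vis2 => some (false, vis2)
  | c :: rest, vis2 =>
    match PySem.List.pyGet? vis2 c with
    | none => none                     -- IndexError on `vis2[child]`
    | some true => loopA recf rest vis2
    | some false =>
      match recf c vis2 with
      | none => none                   -- exception from the recursive call
      | some (true, v) => some (true, v)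
      | some (false, v) => loopA recf rest v

-- A's recursion, fuel-indexed (fuel only guards termination: every nested call flips a False
-- entry of vis2 to True first, so vis2.length + 2 always suffices; this is proved, not assumed)
def dfsA (src : Int) (adj : List (Int × List Int)) (vis1 : List Bool) : Nat → Int → List Bool → Option (Bool × List Bool)
  | 0, _, _ => none
  | Nat.succ f, node, vis2 =>
    match PySem.List.pyGet? vis1 node with
    | none => none                     -- IndexError on `vis1[node]`
    | some true => some (true, vis2)
    | some false =>
      match PySem.List.pySet? vis2 node true with      -- vis2[node] = True
      | none => none                   -- IndexError on `vis2[node] = True`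
      | some vis2' =>
        match lookupAdj adj node with
        | none => none                 -- KeyError on `adj[node]`
        | some children => loopA (fun c v => dfsA src adj vis1 f c v) children vis2'

def dfs_from_target (node : Int) (src : Int) (adj : List (Int × List Int)) (vis1 : List Bool) (vis2 : List Bool) : Bool :=
  match dfsA src adj vis1 (vis2.length + 2) node vis2 with
  | some (found, _) => found
  | none => false                      -- the Python raises here

-- ===== PORT B =====
-- termination helper for B's loop: marking a False entry True strictly lowers the False count
theorem count_false_pySetD_lt (vis2 : List Bool) (c : Int)
    (h : PySem.List.pyGet? vis2 c = some false) :
    (PySem.List.pySetD vis2 c true).count false < vis2.count false := by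
  unfold PySem.List.pyGet? at h
  cases hk : PySem.List.pyIdx? vis2.length c with
  | none => simp [hk] at h
  | some k =>
    simp only [hk, Option.bind_some] at h
    have hklt : k < vis2.length := by
      by_contra hge
      simp [List.getElem?_eq_none (by omega : vis2.length ≤ k)] at h
    have hget : vis2[k] = false := by
      have := List.getElem?_eq_getElem hklt
      rw [this] at h; exact Option.some.inj h
    have hset : PySem.List.pySetD vis2 c true = vis2.set k true := by
      unfold PySem.List.pySetD PySem.List.pySet?
      simp [hk]
    have hone : 1 ≤ vis2.count false := by
      have hm : vis2[k] ∈ vis2 := List.getElem_mem hklt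
      rw [hget] at hm
      exact List.one_le_count_iff.mpr hm
    rw [hset, List.count_set hklt]
    simp only [hget]
    rw [if_pos (by decide), if_neg (by decide)]
    omega

-- B's while-loop: the stack holds, top first, the not-yet-consumed children of each iterator;
-- false on an exhausted stack, and also where the Python raises (outside the loop's pre-order
-- the value is never compared — A's port returns false there too)
def dfsB (adj : List (Int × List Int)) (vis1 : List Bool) : List (List Int) → List Bool → Bool
  | [], _ => false
  | [] :: stack, vis2 => dfsB adj vis1 stack vis2          -- iterator exhausted: pop
  | (c :: rest) :: stack, vis2 =>
    match hv : PySem.List.pyGet? vis2 c with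
    | none => false                                        -- IndexError on `vis2[child]`
    | some true => dfsB adj vis1 (rest :: stack) vis2      -- already visited: continue
    | some false =>
      match PySem.List.pyGet? vis1 c with
      | none => false                                      -- IndexError on `vis1[child]`
      | some true => true
      | some false =>
        match lookupAdj adj c with
        | none => false                                    -- KeyError on `adj[child]`
        | some cs =>
          -- `vis2[child] = True`: in range because the pyGet? above succeeded, so pySetD is exact
          dfsB adj vis1 (cs :: rest :: stack) (PySem.List.pySetD vis2 c true)
  termination_by stack vis2 => (vis2.count false, sizeOf stack)
  decreasing_by
  · exact Prod.Lex.right _ (by simp)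
  · exact Prod.Lex.right _ (by simp)
  · exact Prod.Lex.left _ _ (count_false_pySetD_lt vis2 c hv)

def dfs_from_target_alt (node : Int) (src : Int) (adj : List (Int × List Int)) (vis1 : List Bool) (vis2 : List Bool) : Bool :=
  match PySem.List.pyGet? vis1 node with
  | none => false                      -- IndexError on `vis1[node]`
  | some true => true
  | some false =>
    match PySem.List.pySet? vis2 node true with           -- vis2[node] = True
    | none => false                    -- IndexError
    | some vis2' =>
      match lookupAdj adj node with
      | none => false                  -- KeyError on `adj[node]`
      | some cs => dfsB adj vis1 [cs] vis2'

-- ===== PRECONDITION & SPEC =====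
-- Pre_ restricts to the DFS's natural domain — well-formed graph inputs, where the start node and
-- every listed child have vis1/vis2 entries and an adjacency entry (unless vis1[node] returns True
-- immediately, touching nothing else); on malformed graphs whether the Python raises
-- IndexError/KeyError or happens to return first depends on traversal order.
def Pre_dfs_from_target (node : Int) (src : Int) (adj : List (Int × List Int)) (vis1 : List Bool) (vis2 : List Bool) : Prop :=
  PySem.Raise.InRange vis1.length node ∧
  (PySem.List.pyGet? vis1 node = some true ∨
    (PySem.Raise.InRange vis2.length node ∧ node ∈ adj.map Prod.fst ∧
      ∀ p ∈ adj, ∀ c ∈ p.2,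
        PySem.Raise.InRange vis1.length c ∧ PySem.Raise.InRange vis2.length c ∧
          c ∈ adj.map Prod.fst))
instance (node : Int) (src : Int) (adj : List (Int × List Int)) (vis1 : List Bool) (vis2 : List Bool) : Decidable (Pre_dfs_from_target node src adj vis1 vis2) := by unfold Pre_dfs_from_target; infer_instance

def pvWitness_dfs_from_target : Int × Int × (List (Int × List Int)) × List Bool × List Bool :=
  (0, 2, [(0, [1, 2]), (1, []), (2, [0])], [false, false, true], [false, false, false])

def Spec_dfs_from_target (node : Int) (src : Int) (adj : List (Int × List Int)) (vis1 : List Bool) (vis2 : List Bool) (out : Bool) : Prop := out = dfs_from_target_alt node src adj vis1 vis2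
instance (node : Int) (src : Int) (adj : List (Int × List Int)) (vis1 : List Bool) (vis2 : List Bool) (out : Bool) : Decidable (Spec_dfs_from_target node src adj vis1 vis2 out) := by unfold Spec_dfs_from_target; infer_instance

-- ===== CLAIM (what is proved, stated in full; the proofs are below) =====
def Claim_equal_dfs_from_target : Prop := ∀ (node : Int) (src : Int) (adj : List (Int × List Int)) (vis1 : List Bool) (vis2 : List Bool), Dom_dfs_from_target node src adj vis1 vis2 → Pre_dfs_from_target node src adj vis1 vis2 → Spec_dfs_from_target node src adj vis1 vis2 (dfs_from_target node src adj vis1 vis2)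

-- ===== LEMMAS AND PROOFS =====
theorem pySet?_eq_some_pySetD {α : Type} (xs : List α) (i : Int) (v : α) (b : α)
    (h : PySem.List.pyGet? xs i = some b) :
    PySem.List.pySet? xs i v = some (PySem.List.pySetD xs i v) := by
  unfold PySem.List.pyGet? at h
  unfold PySem.List.pySetD PySem.List.pySet?
  cases hk : PySem.List.pyIdx? xs.length i with
  | none => simp [hk] at h
  | some k => simp

theorem length_of_pySet?_some {α : Type} {xs ys : List α} {i : Int} {v : α}
    (h : PySem.List.pySet? xs i v = some ys) : ys.length = xs.length := by
  unfold PySem.List.pySet? at h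
  cases hk : PySem.List.pyIdx? xs.length i with
  | none => rw [hk] at h; simp at h
  | some k =>
    rw [hk] at h
    simp only [Option.map_some, Option.some.injEq] at h
    rw [← h, List.length_set]

theorem count_false_pySetD_le (vis2 : List Bool) (c : Int) :
    (PySem.List.pySetD vis2 c true).count false ≤ vis2.count false := by
  unfold PySem.List.pySetD PySem.List.pySet?
  cases hk : PySem.List.pyIdx? vis2.length c with
  | none => simp
  | some k =>
    simp only [Option.map_some, Option.getD_some]
    by_cases hklt : k < vis2.length
    · rw [List.count_set hklt, if_neg (show ¬((true == false) = true) by decide)]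
      split_ifs <;> omega
    · rw [List.set_eq_of_length_le (by omega)]

theorem loopA_count (recf : Int → List Bool → Option (Bool × List Bool))
    (hrec : ∀ c v b w, recf c v = some (b, w) → w.count false ≤ v.count false) :
    ∀ (cs : List Int) (vis2 : List Bool) (b : Bool) (v : List Bool),
      loopA recf cs vis2 = some (b, v) → v.count false ≤ vis2.count false := by
  intro cs
  induction cs with
  | nil => intro vis2 b v h; simp [loopA] at h; simp [h.2]
  | cons c rest ih =>
    intro vis2 b v h
    cases hv : PySem.List.pyGet? vis2 c with
    | none => simp [loopA, hv] at h
    | some b2 =>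
      cases b2 with
      | true =>
        simp only [loopA, hv] at h
        exact ih vis2 b v h
      | false =>
        simp only [loopA, hv] at h
        cases hr : recf c vis2 with
        | none => rw [hr] at h; simp at h
        | some p =>
          obtain ⟨found, w⟩ := p
          rw [hr] at h
          have hw := hrec c vis2 found w hr
          cases found with
          | true =>
            simp only [Option.some.injEq, Prod.mk.injEq] at h
            rw [← h.2]; exact hw
          | false =>
            simp only at h
            exact le_trans (ih w b v h) hw

theorem dfsA_count (src : Int) (adj : List (Int × List Int)) (vis1 : List Bool) :
    ∀ (f : Nat) (node : Int) (vis2 : List Bool) (b : Bool) (v : List Bool),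
      dfsA src adj vis1 f node vis2 = some (b, v) → v.count false ≤ vis2.count false := by
  intro f
  induction f with
  | zero => intro node vis2 b v h; simp [dfsA] at h
  | succ f ih =>
    intro node vis2 b v h
    unfold dfsA at h
    cases hv1 : PySem.List.pyGet? vis1 node with
    | none => rw [hv1] at h; simp at h
    | some b1 =>
      rw [hv1] at h
      cases b1 with
      | true =>
        simp only [Option.some.injEq, Prod.mk.injEq] at h
        rw [← h.2]
      | false =>
        simp only at h
        cases hset : PySem.List.pySet? vis2 node true with
        | none => rw [hset] at h; simp at h
        | some vis2' =>
          rw [hset] at h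
          simp only at h
          cases hla : lookupAdj adj node with
          | none => rw [hla] at h; simp at h
          | some children =>
            rw [hla] at h
            simp only at h
            have h1 := loopA_count (fun c v => dfsA src adj vis1 f c v)
              (fun c v b w hw => ih c v b w hw) children vis2' b v h
            have h2 : vis2'.count false ≤ vis2.count false := by
              have : PySem.List.pySet? vis2 node true = some (PySem.List.pySetD vis2 node true) := by
                unfold PySem.List.pySetD PySem.List.pySet? at *
                cases hk : PySem.List.pyIdx? vis2.length node with
                | none => rw [hk] at hset; simp at hset
                | some k => simp
              rw [this] at hset
              rw [← Option.some.inj hset]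
              exact count_false_pySetD_le vis2 node
            omega

-- The central simulation: B's stack loop on `cs :: stack` computes A's child loop on `cs`, then
-- continues with the rest of the stack on the mutated vis2 (false if an exception propagates).
theorem dfsB_simulates (src : Int) (adj : List (Int × List Int)) (vis1 : List Bool) :
    ∀ (f : Nat) (cs : List Int) (stack : List (List Int)) (vis2 : List Bool),
      vis2.count false + 1 ≤ f →
      dfsB adj vis1 (cs :: stack) vis2 =
        (match loopA (fun c v => dfsA src adj vis1 f c v) cs vis2 with
         | none => false
         | some (true, _) => true
         | some (false, v) => dfsB adj vis1 stack v) := by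
  intro f
  induction f with
  | zero => intro cs stack vis2 hf; omega
  | succ f ihf =>
    intro cs
    induction cs with
    | nil => intro stack vis2 _; simp [dfsB, loopA]
    | cons c rest ihc =>
      intro stack vis2 hf
      rw [dfsB]
      cases hv2 : PySem.List.pyGet? vis2 c with
      | none => conv_rhs => rw [loopA, hv2]
      | some b2 =>
        cases b2 with
        | true =>
          rw [ihc stack vis2 hf]
          conv_rhs => rw [loopA]
          rw [hv2]
        | false =>
          cases hv1 : PySem.List.pyGet? vis1 c with
          | none =>
            conv_rhs => rw [loopA]
            rw [hv2]
            simp only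
            conv_rhs => rw [dfsA]
            rw [hv1]
          | some b1 =>
            cases b1 with
            | true =>
              conv_rhs => rw [loopA]
              rw [hv2]
              simp only
              conv_rhs => rw [dfsA]
              rw [hv1]
            | false =>
              -- both sides mark c and descend into its children (KeyError → false on both)
              have hsetD := pySet?_eq_some_pySetD vis2 c true false hv2
              conv_rhs => rw [loopA]
              rw [hv2]
              simp only
              conv_rhs => rw [dfsA]
              rw [hv1, hsetD]
              simp only
              cases hla : lookupAdj adj c with
              | none => simp only
              | some cs' =>
                simp only
                have hlt := count_false_pySetD_lt vis2 c hv2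
                rw [ihf cs' (rest :: stack) (PySem.List.pySetD vis2 c true) (by omega)]
                cases hR : loopA (fun x v => dfsA src adj vis1 f x v) cs' (PySem.List.pySetD vis2 c true) with
                | none => simp only
                | some p =>
                  obtain ⟨found, v⟩ := p
                  cases found with
                  | true => simp only
                  | false =>
                    simp only
                    have hvcnt : v.count false ≤ (PySem.List.pySetD vis2 c true).count false :=
                      loopA_count (fun x v => dfsA src adj vis1 f x v)
                        (fun x v b w hw => dfsA_count src adj vis1 f x v b w hw)
                        cs' (PySem.List.pySetD vis2 c true) false v hR
                    exact ihc stack v (by omega)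

-- ===== VERDICT (by name: the statement is the Claim_ definition above) =====
theorem dfs_from_target_spec : Claim_equal_dfs_from_target := by
  -- the two ports agree on EVERY input (exceptions propagate to `false` in both), so the
  -- precondition — whose role is to say where the PYTHON returns — is not needed by the proof
  intro node src adj vis1 vis2 _ _
  unfold Spec_dfs_from_target dfs_from_target dfs_from_target_alt
  rw [dfsA]
  cases hv1 : PySem.List.pyGet? vis1 node with
  | none => rfl
  | some b1 =>
    cases b1 with
    | true => rfl
    | false =>
      simp only
      cases hset : PySem.List.pySet? vis2 node true with
      | none => rfl
      | some vis2' =>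
        simp only
        cases hla : lookupAdj adj node with
        | none => rfl
        | some cs =>
          simp only
          have hcnt : vis2'.count false + 1 ≤ vis2.length + 1 := by
            have h1 : vis2'.count false ≤ vis2'.length := List.count_le_length
            have h2 : vis2'.length = vis2.length := length_of_pySet?_some hset
            omega
          rw [dfsB_simulates src adj vis1 (vis2.length + 1) cs [] vis2' hcnt]
          cases hR : loopA (fun c v => dfsA src adj vis1 (vis2.length + 1) c v) cs vis2' with
          | none => rfl
          | some p =>
            obtain ⟨found, v⟩ := p
            cases found with
            | false => simp [dfsB]
            | true => rfl
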